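-- pv_equiv track=rewrite | github.com/Aryan-Dev26/AlgoVizard | backend/ml/user_modeling.py | _count_algorithm_switches
-- ===== SOURCE A (Python) =====
-- def _count_algorithm_switches(interactions):
--     """Count how many times user switched between different algorithms"""
--     switches = 0
--     current_algo = None
--
--     for interaction in interactions:
--         algo = interaction.get('algorithm', '')
--         if algo and algo != 'general' and algo != 'homepage':
--             if current_algo and current_algo != algo:
--                 switches += 1
--             current_algo = algo
--
--     return switches
-- ===== SOURCE B (Python) =====
-- def _count_algorithm_switches(interactions):
--     """Count how many times user switched between different algorithms"""
--     algos = [a for a in (i.get('algorithm', '') for i in interactions)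
--              if a and a != 'general' and a != 'homepage']
--
--     def rec(xs):
--         # divide and conquer: switches within each half, plus one at the join
--         # if the two halves meet with different algorithms
--         if len(xs) < 2:
--             return 0
--         mid = len(xs) // 2
--         left, right = xs[:mid], xs[mid:]
--         return rec(left) + rec(right) + (1 if left[-1] != right[0] else 0)
--
--     return rec(algos)
-- ===== Notes on version B (the rewrite author's own statement) =====
-- stated objective: alternative
-- what changed: Replaces A's single-pass current_algo state machine with a filter of valid algorithm names followed by a divide-and-conquer recursion that splits the list in half and adds one when the two halves meet with different names.
import Mathlib
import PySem

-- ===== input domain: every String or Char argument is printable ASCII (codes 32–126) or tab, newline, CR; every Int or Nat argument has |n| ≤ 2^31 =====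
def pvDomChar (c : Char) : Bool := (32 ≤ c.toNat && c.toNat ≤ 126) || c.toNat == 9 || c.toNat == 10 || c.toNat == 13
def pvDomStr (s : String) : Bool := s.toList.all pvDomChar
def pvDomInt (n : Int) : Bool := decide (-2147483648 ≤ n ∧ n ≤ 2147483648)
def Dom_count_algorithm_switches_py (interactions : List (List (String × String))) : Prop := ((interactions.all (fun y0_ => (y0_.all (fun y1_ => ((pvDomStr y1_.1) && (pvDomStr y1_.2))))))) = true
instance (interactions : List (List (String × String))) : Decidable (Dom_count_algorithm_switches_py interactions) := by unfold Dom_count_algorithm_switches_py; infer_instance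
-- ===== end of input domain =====

-- B replaces A's current_algo state machine by a filter pass plus a divide-and-conquer
-- recursion on the filtered list (alternative decomposition; same result).

-- ===== PORT A =====
-- the loop: state = (switches, current_algo); Python truthiness of a string is "≠ ''".
-- 'current_algo and current_algo != algo' is rendered via current_algo.getD "": None ↦ "" is falsy,
-- exact because a stored current_algo is never "" and the 'and' short-circuits on None.
def pvAGo : List (List (String × String)) → Int → Option String → Int
  | [], switches, _ => switches
  | interaction :: rest, switches, current_algo =>
    let algo := (PySem.Dict.mk interaction).getD "algorithm" ""
    if (!(algo == "")) && (!(algo == "general")) && (!(algo == "homepage")) then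
      let cr := current_algo.getD ""
      let switches' := if (!(cr == "")) && (!(cr == algo)) then switches + 1 else switches
      pvAGo rest switches' (some algo)
    else
      pvAGo rest switches current_algo

def count_algorithm_switches_py (interactions : List (List (String × String))) : Int :=
  pvAGo interactions 0 none

-- ===== PORT B =====
def pvValid (a : String) : Bool := (!(a == "")) && (!(a == "general")) && (!(a == "homepage"))

-- rec(xs): slices xs[:mid] / xs[mid:] via PySem.List.slice; left[-1] / right[0] via pyGet?
-- (compared as Options — exact: both indices are always in range because mid ≥ 1 and mid < len).
def pvRec (xs : List String) : Int :=
  if xs.length < 2 then 0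
  else
    let mid := xs.length / 2
    let left := PySem.List.slice xs none (some (mid : Int))
    let right := PySem.List.slice xs (some (mid : Int)) none
    pvRec left + pvRec right +
      (if PySem.List.pyGet? left (-1) ≠ PySem.List.pyGet? right 0 then 1 else 0)
termination_by xs.length
decreasing_by
  · simp only [PySem.List.slice_to_natCast, List.length_take]; omega
  · simp only [PySem.List.slice_from_natCast, List.length_drop]; omega

def count_algorithm_switches_py_alt (interactions : List (List (String × String))) : Int :=
  let algos := interactions.filterMap (fun i =>
    let a := (PySem.Dict.mk i).getD "algorithm" ""
    if pvValid a then some a else none)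
  pvRec algos

-- ===== PRECONDITION & SPEC =====
def Spec_count_algorithm_switches_py (interactions : List (List (String × String))) (out : Int) : Prop := out = count_algorithm_switches_py_alt interactions
instance (interactions : List (List (String × String))) (out : Int) : Decidable (Spec_count_algorithm_switches_py interactions out) := by unfold Spec_count_algorithm_switches_py; infer_instance

-- ===== CLAIM (what is proved, stated in full; the proofs are below) =====
def Claim_equal_count_algorithm_switches_py : Prop := ∀ (interactions : List (List (String × String))), Dom_count_algorithm_switches_py interactions → Spec_count_algorithm_switches_py interactions (count_algorithm_switches_py interactions)

-- ===== LEMMAS AND PROOFS =====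

-- switch count of a current algorithm (if any) followed by a list of valid algorithms
def pvF : Option String → List String → Int
  | _, [] => 0
  | none, a :: l => pvF (some a) l
  | some c, a :: l => (if c ≠ a then 1 else 0) + pvF (some a) l

-- adjacent-differences count, the common characterisation both ports are reduced to
def pvAdj : List String → Int
  | [] => 0
  | [_] => 0
  | a :: b :: t => (if a ≠ b then 1 else 0) + pvAdj (b :: t)

def pvAlgos (interactions : List (List (String × String))) : List String :=
  interactions.filterMap (fun i =>
    let a := (PySem.Dict.mk i).getD "algorithm" ""
    if pvValid a then some a else none)

theorem pvAlgos_cons_invalid (i : List (String × String)) (rest : List (List (String × String)))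
    (h : pvValid ((PySem.Dict.mk i).getD "algorithm" "") = false) :
    pvAlgos (i :: rest) = pvAlgos rest := by
  unfold pvAlgos
  exact List.filterMap_cons_none (by simp [h])

theorem pvAlgos_cons_valid (i : List (String × String)) (rest : List (List (String × String)))
    (h : pvValid ((PySem.Dict.mk i).getD "algorithm" "") = true) :
    pvAlgos (i :: rest) = (PySem.Dict.mk i).getD "algorithm" "" :: pvAlgos rest := by
  unfold pvAlgos
  exact List.filterMap_cons_some (by simp [h])

theorem pvValid_def (a : String) :
    ((!(a == "")) && (!(a == "general")) && (!(a == "homepage"))) = pvValid a := rfl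

-- ===== A-side: the state machine computes sw + pvF cur (valid algos) =====
theorem pvAGo_eq (l : List (List (String × String))) :
    ∀ (sw : Int) (cur : Option String), (∀ c, cur = some c → c ≠ "") →
      pvAGo l sw cur = sw + pvF cur (pvAlgos l) := by
  induction l with
  | nil =>
    intro sw cur _
    cases cur <;> simp [pvAGo, pvAlgos, pvF]
  | cons i rest ih =>
    intro sw cur hcur
    cases hcond : pvValid ((PySem.Dict.mk i).getD "algorithm" "") with
    | false =>
      simp only [pvAGo, pvValid_def]
      rw [if_neg (by simp [hcond])]
      rw [ih _ cur hcur, pvAlgos_cons_invalid i rest hcond]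
    | true =>
      have hp : (PySem.Dict.mk i).getD "algorithm" "" ≠ "" := by
        have h2 := hcond
        simp only [pvValid, Bool.and_eq_true, Bool.not_eq_true', beq_eq_false_iff_ne] at h2
        exact h2.1.1
      simp only [pvAGo, pvValid_def]
      rw [if_pos hcond]
      cases cur with
      | none =>
        simp only [Option.getD_none, beq_self_eq_true, Bool.not_true, Bool.false_and,
          Bool.false_eq_true, if_false]
        rw [ih _ (some _) (fun x hx => by cases hx; exact hp), pvAlgos_cons_valid i rest hcond]
        simp [pvF]
      | some c =>
        have hc : c ≠ "" := hcur c rfl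
        simp only [Option.getD_some]
        by_cases hne : c = (PySem.Dict.mk i).getD "algorithm" ""
        · rw [if_neg (by simp [hne])]
          rw [ih _ (some _) (fun x hx => by cases hx; exact hp), pvAlgos_cons_valid i rest hcond]
          simp [pvF, hne]
        · rw [if_pos (by simp [hc, hne])]
          rw [ih _ (some _) (fun x hx => by cases hx; exact hp), pvAlgos_cons_valid i rest hcond]
          simp only [pvF]
          rw [if_pos hne]
          ring

theorem pvF_some_eq_adj (l : List String) : ∀ a, pvF (some a) l = pvAdj (a :: l) := by
  induction l with
  | nil => intro a; simp [pvF, pvAdj]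
  | cons b t ih => intro a; simp [pvF, pvAdj, ih]

theorem pvF_none_eq_adj (l : List String) : pvF none l = pvAdj l := by
  cases l with
  | nil => simp [pvF, pvAdj]
  | cons a t => simp [pvF, pvF_some_eq_adj]

-- ===== B-side: pvAdj splits over an append at a nonempty/nonempty boundary =====
theorem pvAdj_append (l r : List String) (hl : l ≠ []) (hr : r ≠ []) :
    pvAdj (l ++ r) = pvAdj l + pvAdj r + (if l.getLast? ≠ r.head? then 1 else 0) := by
  induction l with
  | nil => exact absurd rfl hl
  | cons a l' ih =>
    cases l' with
    | nil =>
      cases r with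
      | nil => exact absurd rfl hr
      | cons b t =>
        simp only [List.cons_append, List.nil_append, pvAdj, List.getLast?_singleton,
          List.head?_cons]
        by_cases h : a = b <;> simp [h] <;> try ring
    | cons x l'' =>
      have h' : (x :: l'') ≠ ([] : List String) := by simp
      have key := ih h'
      simp only [List.cons_append] at key ⊢
      show (if a ≠ x then (1:Int) else 0) + pvAdj (x :: (l'' ++ r)) = _
      rw [key]
      have hlast : (a :: x :: l'').getLast? = (x :: l'').getLast? := by
        rcases l'' with _ | ⟨y, t⟩ <;> simp [List.getLast?]
      rw [hlast]
      show _ = (if a ≠ x then (1:Int) else 0) + pvAdj (x :: l'') + pvAdj r + _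
      ring

theorem pvRec_eq_adj (xs : List String) : pvRec xs = pvAdj xs := by
  rw [pvRec]
  split
  · rename_i h
    match xs, h with
    | [], _ => simp [pvAdj]
    | [a], _ => simp [pvAdj]
  · rename_i h
    have hlen : 2 ≤ xs.length := by omega
    have hmid1 : 1 ≤ xs.length / 2 := by omega
    have hmid2 : xs.length / 2 < xs.length := by omega
    simp only [PySem.List.slice_to_natCast, PySem.List.slice_from_natCast]
    have ihl := pvRec_eq_adj (xs.take (xs.length / 2))
    have ihr := pvRec_eq_adj (xs.drop (xs.length / 2))
    rw [ihl, ihr]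
    have hl : xs.take (xs.length / 2) ≠ [] :=
      List.ne_nil_of_length_pos (by simp only [List.length_take]; omega)
    have hr : xs.drop (xs.length / 2) ≠ [] :=
      List.ne_nil_of_length_pos (by simp only [List.length_drop]; omega)
    have hsplit : xs = xs.take (xs.length / 2) ++ xs.drop (xs.length / 2) :=
      (List.take_append_drop _ _).symm
    conv_rhs => rw [hsplit]
    rw [pvAdj_append _ _ hl hr]
    congr 1
    congr 1
    · rw [PySem.List.pyGet?_neg_one, PySem.List.pyGet?_zero]
      rw [List.head?_eq_getElem?]
termination_by xs.length
decreasing_by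
  · simp only [List.length_take]; omega
  · simp only [List.length_drop]; omega

-- ===== VERDICT (by name: the statement is the Claim_ definition above) =====
theorem count_algorithm_switches_py_spec : Claim_equal_count_algorithm_switches_py := by
  intro interactions _
  show count_algorithm_switches_py interactions = count_algorithm_switches_py_alt interactions
  unfold count_algorithm_switches_py count_algorithm_switches_py_alt
  rw [pvAGo_eq interactions 0 none (by intro c hc; cases hc)]
  rw [show (interactions.filterMap (fun i =>
      let a := (PySem.Dict.mk i).getD "algorithm" ""
      if pvValid a then some a else none)) = pvAlgos interactions from rfl]
  rw [pvF_none_eq_adj, pvRec_eq_adj]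
  ring
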